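-- pv_equiv track=rewrite | github.com/jesper-olsen/huffman-py | huffman.py | canonical_huffman_codes
-- ===== SOURCE A (Python) =====
-- def canonical_huffman_codes(symbols_with_lengths):
--     """
--     Generate canonical Huffman codes from symbol-length pairs.
--
--     Args:
--         symbols_with_lengths: List of (symbol, code_length) tuples
--
--     Returns:
--         dict: Mapping of symbols to their binary code strings
--     """
--
--     # Sort by (length, symbol) as per canonical Huffman rules
--     sorted_symbols = sorted(symbols_with_lengths, key=lambda x: (x[1], x[0]))
--     code = 0
--     prev_len = 0
--     codebook = {}
--     for symbol, length in sorted_symbols: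
--         code <<= length - prev_len
--         codebook[symbol] = f"{code:0{length}b}"
--         code += 1
--         prev_len = length
--     return codebook
-- ===== SOURCE B (Python) =====
-- def canonical_huffman_codes(symbols_with_lengths):
--     """
--     Generate canonical Huffman codes from symbol-length pairs.
--
--     Stateless closed form: the code assigned to the i-th symbol in
--     (length, symbol) order is sum(2**(L_i - L_j) for j < i), so each
--     entry is computed directly from the prefix of sorted pairs instead
--     of threading a running (code, prev_len) state.
--     """
--     ordered = sorted(symbols_with_lengths, key=lambda x: (x[1], x[0]))
--     return {
--         symbol: format(sum(1 << (length - l) for _, l in ordered[:i]),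
--                        "0{}b".format(length))
--         for i, (symbol, length) in enumerate(ordered)
--     }
-- ===== Notes on version B (the rewrite author's own statement) =====
-- stated objective: alternative
-- what changed: Replaces A's single stateful loop threading a running (code, prev_len) pair through shifts with a stateless closed form: each symbol's code is computed directly as sum(2**(L_i - L_j) for j < i) over the sorted prefix, built as a dict comprehension over enumerate.
import Mathlib
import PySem

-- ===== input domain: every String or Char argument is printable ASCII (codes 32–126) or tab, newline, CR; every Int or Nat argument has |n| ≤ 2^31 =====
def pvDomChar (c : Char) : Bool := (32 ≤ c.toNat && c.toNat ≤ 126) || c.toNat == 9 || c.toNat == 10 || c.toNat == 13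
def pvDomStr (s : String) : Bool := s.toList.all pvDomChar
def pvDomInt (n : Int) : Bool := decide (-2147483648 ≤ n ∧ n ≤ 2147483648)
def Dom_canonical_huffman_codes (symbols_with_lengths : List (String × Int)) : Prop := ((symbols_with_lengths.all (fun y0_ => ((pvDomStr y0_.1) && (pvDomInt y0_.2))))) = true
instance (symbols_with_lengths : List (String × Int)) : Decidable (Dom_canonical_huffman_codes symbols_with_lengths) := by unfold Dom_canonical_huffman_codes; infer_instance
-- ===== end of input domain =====

-- B replaces A's stateful (code, prev_len) loop with a per-symbol closed-form sum over the
-- sorted prefix (alternative decomposition, not faster); equivalence proved on lists with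
-- nonnegative code lengths (A raises ValueError on a negative shift otherwise).


-- 1 << n for a Nat shift amount (Python's 1 << k; exact for k ≥ 0, which Pre_ guarantees)
def pyShl1 (n : Nat) : Int := 1 <<< n

-- f"{code:0{w}b}" for a nonnegative code: binary digits zero-padded on the left to width w
-- (exact for 0 ≤ code — all codes both programs format are ≥ 0 — and any w; shared format builtin)
def pyBinPad (code w : Int) : String := PySem.Str.zfill (PySem.Int.toBin code) w

-- ===== PORT A =====
-- 'code <<= length - prev_len': the shift amount is ≥ 0 for every input admitted by
-- Pre_ (lengths ≥ 0 and nondecreasing after sorting), where '.toNat' is exact.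
def canonical_huffman_codes (symbols_with_lengths : List (String × Int)) : List (String × String) :=
  let sorted_symbols := PySem.List.sorted symbols_with_lengths (fun x => toLex (x.2, x.1))
  let r := sorted_symbols.foldl
    (fun (st : Int × Int × PySem.Dict String String) sl =>
      let code := st.1 <<< (sl.2 - st.2.1).toNat
      let codebook := st.2.2.insert sl.1 (pyBinPad code sl.2)
      (code + 1, sl.2, codebook))
    (0, 0, PySem.Dict.empty)
  r.2.2.items

-- ===== PORT B =====
-- '1 << (length - l)': exponent ≥ 0 for inputs admitted by Pre_ (sorted lengths), '.toNat' exact.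
def canonical_huffman_codes_alt (symbols_with_lengths : List (String × Int)) : List (String × String) :=
  let ordered := PySem.List.sorted symbols_with_lengths (fun x => toLex (x.2, x.1))
  ((PySem.List.enumerate ordered).foldl
    (fun (codebook : PySem.Dict String String) ip =>
      codebook.insert ip.2.1
        (pyBinPad
          ((PySem.List.slice ordered none (some ip.1)).foldl
            (fun acc p => acc + pyShl1 (ip.2.2 - p.2).toNat) 0)
          ip.2.2))
    PySem.Dict.empty).items

-- ===== PRECONDITION & SPEC =====
-- Pre_ excludes exactly the lists containing a negative code length: there the Python A
-- raises ValueError ('negative shift count') on its first iteration.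
def Pre_canonical_huffman_codes (symbols_with_lengths : List (String × Int)) : Prop :=
  ∀ p ∈ symbols_with_lengths, 0 ≤ p.2
instance (symbols_with_lengths : List (String × Int)) : Decidable (Pre_canonical_huffman_codes symbols_with_lengths) := by unfold Pre_canonical_huffman_codes; infer_instance

def pvWitness_canonical_huffman_codes : (List (String × Int)) := [("a", 2), ("b", 1), ("c", 2)]

def Spec_canonical_huffman_codes (symbols_with_lengths : List (String × Int)) (out : List (String × String)) : Prop := out = canonical_huffman_codes_alt symbols_with_lengths
instance (symbols_with_lengths : List (String × Int)) (out : List (String × String)) : Decidable (Spec_canonical_huffman_codes symbols_with_lengths out) := by unfold Spec_canonical_huffman_codes; infer_instance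

-- ===== CLAIM (what is proved, stated in full; the proofs are below) =====
def Claim_equal_canonical_huffman_codes : Prop := ∀ (symbols_with_lengths : List (String × Int)), Dom_canonical_huffman_codes symbols_with_lengths → Pre_canonical_huffman_codes symbols_with_lengths → Spec_canonical_huffman_codes symbols_with_lengths (canonical_huffman_codes symbols_with_lengths)

-- ===== LEMMAS AND PROOFS =====

-- the closed-form sum B computes for a symbol of length L over a processed prefix
def sumExp (done : List (String × Int)) (L : Int) : Int :=
  done.foldl (fun acc p => acc + pyShl1 (L - p.2).toNat) 0

theorem pyShl1_eq_pow (n : Nat) : pyShl1 n = 2 ^ n := by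
  simp [pyShl1, Int.shiftLeft_eq]

theorem sumExp_eq_sum (done : List (String × Int)) (L : Int) :
    sumExp done L = (done.map (fun p => pyShl1 (L - p.2).toNat)).sum := by
  simpa [sumExp] using
    PySem.List.foldl_add (l := done) (g := fun p => pyShl1 (L - p.2).toNat) (a := 0)

theorem sumExp_shift (done : List (String × Int)) (prev L : Int)
    (hd : ∀ p ∈ done, p.2 ≤ prev) (hpl : prev ≤ L) :
    sumExp done prev <<< (L - prev).toNat = sumExp done L := by
  simp only [sumExp_eq_sum, Int.shiftLeft_eq]
  rw [← List.sum_map_mul_right]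
  refine congrArg List.sum (List.map_congr_left ?_)
  intro p hp
  have h1 : p.2 ≤ prev := hd p hp
  have : (prev - p.2).toNat + (L - prev).toNat = (L - p.2).toNat := by omega
  simp [pyShl1_eq_pow, pow_add, ← this]

theorem sumExp_append (done : List (String × Int)) (s : String) (L : Int) :
    sumExp (done ++ [(s, L)]) L = sumExp done L + 1 := by
  simp [sumExp_eq_sum, pyShl1_eq_pow]

theorem loop_eq (F : List (String × Int)) :
    ∀ (S done : List (String × Int)) (code prev : Int) (book : PySem.Dict String String),
    F = done ++ S →
    code = sumExp done prev →
    (∀ p ∈ done, p.2 ≤ prev) →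
    (∀ p ∈ S, prev ≤ p.2) →
    S.Pairwise (fun a b => a.2 ≤ b.2) →
    (S.foldl
      (fun (st : Int × Int × PySem.Dict String String) sl =>
        let code := st.1 <<< (sl.2 - st.2.1).toNat
        let codebook := st.2.2.insert sl.1 (pyBinPad code sl.2)
        (code + 1, sl.2, codebook))
      (code, prev, book)).2.2 =
    (PySem.List.enumerate S (done.length : Int)).foldl
      (fun (codebook : PySem.Dict String String) ip =>
        codebook.insert ip.2.1
          (pyBinPad
            ((PySem.List.slice F none (some ip.1)).foldl
              (fun acc p => acc + pyShl1 (ip.2.2 - p.2).toNat) 0)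
            ip.2.2))
      book := by
  intro S
  induction S with
  | nil => intro done code prev book _ _ _ _ _; rfl
  | cons hd tl ih =>
    intro done code prev book hF hcode hdone hS hpw
    obtain ⟨s, L⟩ := hd
    rw [PySem.List.enumerate_cons]
    simp only [List.foldl_cons]
    have hprevL : prev ≤ L := hS (s, L) (List.mem_cons_self)
    -- the code A assigns equals B's prefix sum
    have hslice : PySem.List.slice F none (some ((done.length : Nat) : Int)) = done := by
      rw [PySem.List.slice_to_natCast, hF, List.take_left]
    have hA : code <<< (L - prev).toNat = sumExp done L := by
      rw [hcode]; exact sumExp_shift done prev L hdone hprevL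
    have hB : (PySem.List.slice F none (some ((done.length : Nat) : Int))).foldl
        (fun acc p => acc + pyShl1 (L - p.2).toNat) 0 = sumExp done L := by
      rw [hslice]; rfl
    rw [hB, ← hA]
    refine ih (done ++ [(s, L)]) (code <<< (L - prev).toNat + 1) L
      (book.insert s (pyBinPad (code <<< (L - prev).toNat) L)) ?_ ?_ ?_ ?_ ?_ |>.trans ?_
    · rw [hF, List.append_assoc]; rfl
    · rw [hA, ← sumExp_append done s L]
    · intro p hp
      rcases List.mem_append.1 hp with h | h
      · exact le_trans (hdone p h) hprevL
      · simp at h; rw [h]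
    · intro p hp
      exact (List.pairwise_cons.1 hpw).1 p hp
    · exact (List.pairwise_cons.1 hpw).2
    · have : ((done ++ [(s, L)]).length : Int) = (done.length : Int) + 1 := by
        simp
      rw [this]

-- ===== VERDICT (by name: the statement is the Claim_ definition above) =====
theorem canonical_huffman_codes_spec : Claim_equal_canonical_huffman_codes := by
  intro xs _ hpre
  unfold Spec_canonical_huffman_codes
  simp only [canonical_huffman_codes, canonical_huffman_codes_alt]
  set S := PySem.List.sorted xs (fun x => toLex (x.2, x.1)) with hSdef
  have hmem : ∀ p ∈ S, (0 : Int) ≤ p.2 := by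
    intro p hp
    exact hpre p ((PySem.List.mem_sorted _ _ _ _).1 hp)
  have hpw : S.Pairwise (fun a b => a.2 ≤ b.2) := by
    refine (PySem.List.sorted_pairwise xs (fun x => toLex (x.2, x.1))).imp ?_
    intro a b hab
    rcases Prod.Lex.le_iff.1 hab with h | h
    · exact le_of_lt h
    · exact le_of_eq h.1
  have h := loop_eq S S [] 0 0 PySem.Dict.empty rfl rfl (by simp) hmem hpw
  simp only [List.length_nil, Nat.cast_zero] at h
  show _ = (_ : PySem.Dict String String).items
  rw [h]
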